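-- pv_equiv track=rewrite | github.com/proditserbia/ai-video-pipeline-kit | backend/worker/modules/script_planner/planner.py | _merge_short_blocks
-- ===== SOURCE A (Python) =====
-- _CONVERSATIONAL_OPENERS: frozenset[str] = frozenset({
--     "hey", "hi", "hello", "well", "now", "so", "alright", "okay", "ok",
--     "great", "good", "right", "sure", "yes", "no", "wait", "listen",
--     "look", "see", "think", "remember", "note", "here", "there",
--     "let", "let's", "here's",
-- })
--
-- _MIN_BLOCK_CHARS: int = 60
--
-- _MAX_CONVERSATIONAL_WORDS: int = 8
--
-- def _is_short_conversational(text: str) -> bool: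
--     """Return ``True`` when *text* is a short conversational filler.
--
--     A block qualifies when it is below ``_MIN_BLOCK_CHARS`` characters *and*
--     its first word is a known conversational opener with at most
--     ``_MAX_CONVERSATIONAL_WORDS`` words total.
--     """
--     stripped = text.strip().rstrip(".!?,;")
--     if len(stripped) >= _MIN_BLOCK_CHARS:
--         return False
--     words = stripped.lower().split()
--     if not words:
--         return True
--     return words[0] in _CONVERSATIONAL_OPENERS and len(words) <= _MAX_CONVERSATIONAL_WORDS
--
-- def _merge_short_blocks(blocks: list[str]) -> list[str]:
--     """Merge short conversational opener blocks into the following block.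
--
--     When a block is detected as a short conversational filler it is held as
--     *pending* and prepended to the next block.  If the last block is also a
--     short filler it is appended to the preceding result (or kept solo when
--     there is no preceding result).
--     """
--     if len(blocks) <= 1:
--         return list(blocks)
--
--     result: list[str] = []
--     pending: str = ""
--     for block in blocks:
--         if pending:
--             # Pending opener: merge unconditionally and emit without re-check.
--             result.append(pending + " " + block)
--             pending = ""
--         elif _is_short_conversational(block):
--             pending = block
--         else:
--             result.append(block)
--
--     # Dangling short opener at the end.
--     if pending:
--         if result:
--             result[-1] = result[-1] + " " + pending
--         else:
--             result.append(pending)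
--
--     return result
-- ===== SOURCE B (Python) =====
-- _CONVERSATIONAL_OPENERS = frozenset({
--     "hey", "hi", "hello", "well", "now", "so", "alright", "okay", "ok",
--     "great", "good", "right", "yes", "no", "wait", "listen",
--     "look", "see", "think", "remember", "note", "here", "there",
--     "let", "let's", "here's", "sure",
-- })
--
-- _MIN_BLOCK_CHARS = 60
--
-- _MAX_CONVERSATIONAL_WORDS = 8
--
--
-- def _is_short_conversational(text):
--     stripped = text.strip().rstrip(".!?,;")
--     if len(stripped) >= _MIN_BLOCK_CHARS:
--         return False
--     words = stripped.lower().split()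
--     if not words:
--         return True
--     return words[0] in _CONVERSATIONAL_OPENERS and len(words) <= _MAX_CONVERSATIONAL_WORDS
--
--
-- def _merge_short_blocks(blocks):
--     if len(blocks) <= 1:
--         return list(blocks)
--     result = []
--     n = len(blocks)
--     i = 0
--     while i < n:
--         b = blocks[i]
--         if not b:
--             i += 1  # empty blocks vanish
--         elif _is_short_conversational(b):
--             if i + 1 < n:
--                 # merge the opener with its successor, consuming both
--                 result.append(b + " " + blocks[i + 1])
--                 i += 2
--             else:
--                 # dangling opener at the end
--                 if result:
--                     result[-1] = result[-1] + " " + b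
--                 else:
--                     result.append(b)
--                 i += 1
--         else:
--             result.append(b)
--             i += 1
--     return result
-- ===== Notes on version B (the rewrite author's own statement) =====
-- stated objective: alternative
-- what changed: Replaced A's pending-state machine (hold a short opener, merge it on the next iteration, patch a dangling pending after the loop) with a single lookahead index loop that merges an opener with its successor in one step, skips empty blocks, and folds a dangling final opener into the last result in-branch.
import Mathlib
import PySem

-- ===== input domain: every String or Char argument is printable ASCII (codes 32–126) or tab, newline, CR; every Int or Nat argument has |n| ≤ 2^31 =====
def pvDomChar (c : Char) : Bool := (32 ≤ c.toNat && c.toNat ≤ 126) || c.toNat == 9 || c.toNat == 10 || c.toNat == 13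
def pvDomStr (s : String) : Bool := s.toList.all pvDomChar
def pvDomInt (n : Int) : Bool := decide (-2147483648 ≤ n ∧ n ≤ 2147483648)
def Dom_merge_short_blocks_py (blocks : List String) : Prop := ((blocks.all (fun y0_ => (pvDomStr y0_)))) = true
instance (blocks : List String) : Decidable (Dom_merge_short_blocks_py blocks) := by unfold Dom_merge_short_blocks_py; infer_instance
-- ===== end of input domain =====

-- B replaces A's pending-state machine by a lookahead index loop that merges an opener with its
-- successor in one step and skips empty blocks; objective: alternative (same O(n) cost).

-- ===== PORT A =====
def convOpeners : List String :=
  ["hey", "hi", "hello", "well", "now", "so", "alright", "okay", "ok",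
   "great", "good", "right", "sure", "yes", "no", "wait", "listen",
   "look", "see", "think", "remember", "note", "here", "there",
   "let", "let's", "here's"]

-- s.rstrip(".!?,;") — PySem has no chars-rstrip; exact hand port (drop trailing chars of the set)
def rstripPunct (cs : List Char) : List Char :=
  (cs.reverse.dropWhile (fun c => c == '.' || c == '!' || c == '?' || c == ',' || c == ';')).reverse

-- port of _is_short_conversational (shared helper of both Pythons)
def isShortConv (text : String) : Bool :=
  let stripped := rstripPunct (PySem.Str.strip text).toList
  if 60 ≤ stripped.length then false
  else
    match PySem.Chars.split₀ (PySem.Chars.lower stripped) with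
    | [] => true
    | w :: ws => convOpeners.contains (String.ofList w) && decide ((w :: ws).length ≤ 8)

-- Python's truthiness test on a str ('if pending:' / 'if not b:'): True iff len > 0
def blockNonempty (s : String) : Bool := PySem.Str.len s != 0

-- A's loop body, state = (result, pending)
def stepA (st : List String × String) (block : String) : List String × String :=
  if blockNonempty st.2 then (st.1 ++ [st.2 ++ " " ++ block], "")
  else if isShortConv block then (st.1, block)
  else (st.1 ++ [block], st.2)

-- A's dangling-pending postprocessing
def postA (st : List String × String) : List String :=
  if blockNonempty st.2 then
    if st.1 ≠ [] then st.1.dropLast ++ [st.1.getLast! ++ " " ++ st.2]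
    else st.1 ++ [st.2]
  else st.1

def merge_short_blocks_py (blocks : List String) : List String :=
  if blocks.length ≤ 1 then blocks
  else postA (blocks.foldl stepA ([], ""))

-- ===== PORT B =====
-- the index loop of Source B as recursion on the remaining blocks (i ↦ first element,
-- the 'i + 1 < n' lookahead ↦ one- vs two-element pattern); 'if not b:' = !blockNonempty b
def altLoop (result : List String) : List String → List String
  | [] => result
  | [b] =>
    if !blockNonempty b then result
    else if isShortConv b then
      if result ≠ [] then result.dropLast ++ [result.getLast! ++ " " ++ b]
      else result ++ [b]
    else result ++ [b]
  | b :: nxt :: rest' =>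
    if !blockNonempty b then altLoop result (nxt :: rest')
    else if isShortConv b then altLoop (result ++ [b ++ " " ++ nxt]) rest'
    else altLoop (result ++ [b]) (nxt :: rest')

def merge_short_blocks_py_alt (blocks : List String) : List String :=
  if blocks.length ≤ 1 then blocks
  else altLoop [] blocks

-- ===== PRECONDITION & SPEC =====
def Spec_merge_short_blocks_py (blocks : List String) (out : List String) : Prop := out = merge_short_blocks_py_alt blocks
instance (blocks : List String) (out : List String) : Decidable (Spec_merge_short_blocks_py blocks out) := by unfold Spec_merge_short_blocks_py; infer_instance

-- ===== CLAIM (what is proved, stated in full; the proofs are below) =====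
def Claim_equal_merge_short_blocks_py : Prop := ∀ (blocks : List String), Dom_merge_short_blocks_py blocks → Spec_merge_short_blocks_py blocks (merge_short_blocks_py blocks)

-- ===== LEMMAS AND PROOFS =====

theorem blockNonempty_false_toList {p : String} (h : blockNonempty p = false) : p.toList = [] := by
  simp [blockNonempty] at h
  subst h
  simp

-- a falsy (length-0) block strips to nothing, so _is_short_conversational accepts it
theorem isShortConv_of_empty {b : String} (h : blockNonempty b = false) : isShortConv b = true := by
  simp [isShortConv, rstripPunct, blockNonempty_false_toList h, PySem.Chars.strip,
    PySem.Chars.lstrip, PySem.Chars.rstrip, PySem.Chars.split₀, PySem.Chars.split₀.go,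
    PySem.Chars.lower]

theorem stepA_fresh_short {b : String} (hshort : isShortConv b = true)
    {p : String} (hp : blockNonempty p = false) (result : List String) :
    stepA (result, p) b = (result, b) := by
  simp [stepA, hp, hshort]

theorem stepA_fresh_plain {b : String} (hshort : ¬ isShortConv b = true)
    {p : String} (hp : blockNonempty p = false) (result : List String) :
    stepA (result, p) b = (result ++ [b], p) := by
  simp [stepA, hp, hshort]

theorem stepA_pending {b : String} (hb : blockNonempty b = true) (result : List String)
    (nxt : String) : stepA (result, b) nxt = (result ++ [b ++ " " ++ nxt], "") := by
  simp [stepA, hb]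

theorem postA_fresh {p : String} (hp : blockNonempty p = false) (result : List String) :
    postA (result, p) = result := by
  simp [postA, hp]

theorem postA_pending {b : String} (hb : blockNonempty b = true) (result : List String) :
    postA (result, b) =
      if result ≠ [] then result.dropLast ++ [result.getLast! ++ " " ++ b]
      else result ++ [b] := by
  simp [postA, hb]

theorem empty_str_falsy : blockNonempty "" = false := by decide

theorem loop_eq (result l : List String) (p : String) (hp : blockNonempty p = false) :
    postA (l.foldl stepA (result, p)) = altLoop result l := by
  induction result, l using altLoop.induct generalizing p with
  | case1 result => exact postA_fresh hp result
  | case2 result b h =>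
    have h' : blockNonempty b = false := by simpa using h
    rw [List.foldl_cons, List.foldl_nil, stepA_fresh_short (isShortConv_of_empty h') hp,
      altLoop.eq_2, if_pos h]
    exact postA_fresh h' result
  | case3 result b hb hshort hres =>
    have hb' : blockNonempty b = true := by simpa using hb
    rw [List.foldl_cons, List.foldl_nil, stepA_fresh_short hshort hp, altLoop.eq_2,
      if_neg hb, if_pos hshort, if_pos hres, postA_pending hb', if_pos hres]
  | case4 result b hb hshort hres =>
    have hb' : blockNonempty b = true := by simpa using hb
    rw [List.foldl_cons, List.foldl_nil, stepA_fresh_short hshort hp, altLoop.eq_2,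
      if_neg hb, if_pos hshort, if_neg hres, postA_pending hb', if_neg hres]
  | case5 result b hb hshort =>
    have hb' : blockNonempty b = true := by simpa using hb
    rw [List.foldl_cons, List.foldl_nil, stepA_fresh_plain hshort hp, altLoop.eq_2,
      if_neg hb, if_neg hshort]
    exact postA_fresh hp (result ++ [b])
  | case6 result b nxt rest' h ih =>
    have h' : blockNonempty b = false := by simpa using h
    rw [List.foldl_cons, stepA_fresh_short (isShortConv_of_empty h') hp, altLoop.eq_3, if_pos h]
    exact ih b h'
  | case7 result b nxt rest' hb hshort ih =>
    have hb' : blockNonempty b = true := by simpa using hb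
    rw [List.foldl_cons, stepA_fresh_short hshort hp, List.foldl_cons, stepA_pending hb',
      altLoop.eq_3, if_neg hb, if_pos hshort]
    exact ih "" empty_str_falsy
  | case8 result b nxt rest' hb hshort ih =>
    have hb' : blockNonempty b = true := by simpa using hb
    rw [List.foldl_cons, stepA_fresh_plain hshort hp, altLoop.eq_3, if_neg hb, if_neg hshort]
    exact ih p hp

-- ===== VERDICT (by name: the statement is the Claim_ definition above) =====
theorem merge_short_blocks_py_spec : Claim_equal_merge_short_blocks_py := by
  intro blocks _
  unfold Spec_merge_short_blocks_py merge_short_blocks_py merge_short_blocks_py_alt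
  by_cases h : blocks.length ≤ 1
  · simp [h]
  · simp [h, loop_eq [] blocks "" empty_str_falsy]
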